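-- pv_equiv track=rewrite | github.com/FosterREDspace/advent_of_code | day3/day3_part1.py | largest_two_digit
-- ===== SOURCE A (Python) =====
-- def largest_two_digit(nums):
-- 	max_num = 0
-- 	n = len(nums)
-- 	for i in range(n - 1):
-- 		tens = nums[i]
-- 		ones = max(nums[i+1:])
-- 		num = 10 * tens + ones
-- 		if num > max_num:
-- 			max_num = num
-- 	return max_num
-- ===== SOURCE B (Python) =====
-- def largest_two_digit(nums):
--     best = 0
--     suffix_max = None
--     for x in reversed(nums):
--         if suffix_max is not None:
--             cand = 10 * x + suffix_max
--             if cand > best: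
--                 best = cand
--             if x > suffix_max:
--                 suffix_max = x
--         else:
--             suffix_max = x
--     return best
-- ===== Notes on version B (the rewrite author's own statement) =====
-- stated objective: faster
-- what changed: Replaces the quadratic loop that recomputes max(nums[i+1:]) for every index with a single right-to-left pass maintaining a running suffix maximum.
import Mathlib
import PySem

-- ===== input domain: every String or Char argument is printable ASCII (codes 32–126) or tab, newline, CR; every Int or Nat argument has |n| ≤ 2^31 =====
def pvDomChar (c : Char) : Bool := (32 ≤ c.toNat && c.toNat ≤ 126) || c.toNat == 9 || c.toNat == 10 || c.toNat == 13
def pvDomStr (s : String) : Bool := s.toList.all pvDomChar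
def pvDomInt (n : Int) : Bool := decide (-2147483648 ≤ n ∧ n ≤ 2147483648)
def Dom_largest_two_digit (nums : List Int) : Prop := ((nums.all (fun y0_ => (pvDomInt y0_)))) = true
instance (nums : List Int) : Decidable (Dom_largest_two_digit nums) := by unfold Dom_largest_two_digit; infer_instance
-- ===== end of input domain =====

-- B replaces A's quadratic per-index recomputation of max(nums[i+1:]) by one
-- right-to-left pass with a running suffix maximum (objective: faster, O(n) vs O(n^2)).

-- ===== PORT A =====
-- literal transliteration of A: for i in range(n-1), candidate 10*nums[i] + max(nums[i+1:]),
-- keep the running max starting at 0.  (max of a nonempty slice via PySem.List.max?;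
-- the slice is always nonempty for i in range(n-1), so the .getD 0 default is never used.)
def largest_two_digit (nums : List Int) : Int :=
  let n : Int := nums.length
  (PySem.List.pyRange 0 (n - 1) 1).foldl
    (fun max_num i =>
      let tens := PySem.List.pyGetD nums i 0
      let ones := (PySem.List.max? (PySem.List.slice nums (some (i + 1)) none) (fun y => y)).getD 0
      let num := 10 * tens + ones
      if num > max_num then num else max_num)
    0

-- ===== PORT B =====
-- transliteration of Source B: fold over reversed(nums) with state (suffix_max : Option Int, best).
def bStep (st : Option Int × Int) (x : Int) : Option Int × Int :=
  match st.1 with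
  | some m =>
      let cand := 10 * x + m
      (some (if x > m then x else m), if cand > st.2 then cand else st.2)
  | none => (some x, st.2)

def largest_two_digit_alt (nums : List Int) : Int :=
  (nums.reverse.foldl bStep (none, 0)).2

-- ===== PRECONDITION & SPEC =====
def Spec_largest_two_digit (nums : List Int) (out : Int) : Prop := out = largest_two_digit_alt nums
instance (nums : List Int) (out : Int) : Decidable (Spec_largest_two_digit nums out) := by unfold Spec_largest_two_digit; infer_instance

-- ===== CLAIM (what is proved, stated in full; the proofs are below) =====
def Claim_equal_largest_two_digit : Prop := ∀ (nums : List Int), Dom_largest_two_digit nums → Spec_largest_two_digit nums (largest_two_digit nums)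

-- ===== LEMMAS AND PROOFS =====

-- common reference value: the list of A's candidates, built structurally
def candList : List Int → List Int
  | [] => []
  | [_] => []
  | x :: y :: t => (10 * x + t.foldl max y) :: candList (y :: t)

def refVal (nums : List Int) : Int := (candList nums).foldl max 0

-- Python's `b if b > a else a` is `max a b` on Int
theorem ite_gt_eq_max (a b : Int) : (if b > a then b else a) = max a b := by
  rw [max_def]; split_ifs <;> omega

theorem foldl_max_init (l : List Int) (a b : Int) :
    l.foldl max (max a b) = max a (l.foldl max b) := by
  induction l generalizing b with
  | nil => rfl
  | cons x l ih =>
      simp only [List.foldl_cons, max_assoc]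
      exact ih (max b x)

-- ---- A equals refVal ----

-- the candidate A computes at index i
def cA (nums : List Int) (i : Int) : Int :=
  10 * PySem.List.pyGetD nums i 0 +
    (PySem.List.max? (PySem.List.slice nums (some (i + 1)) none) (fun y => y)).getD 0

theorem A_as_foldmax (nums : List Int) :
    largest_two_digit nums =
      ((PySem.List.pyRange 0 ((nums.length : Int) - 1) 1).map (cA nums)).foldl max 0 := by
  simp only [largest_two_digit]
  rw [List.foldl_map]
  congr 1
  funext acc i
  simp only [cA]
  exact ite_gt_eq_max acc _

theorem cA_shift (x : Int) (xs : List Int) (k : ℕ) :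
    cA (x :: xs) ((1 : Int) + (k : Int)) = cA xs (k : Int) := by
  unfold cA
  have h1 : (1 : Int) + (k : Int) = ((k + 1 : ℕ) : Int) := by push_cast; ring
  have h3 : ((k : Int) + 1) = ((k + 1 : ℕ) : Int) := by push_cast; ring
  have h2 : ((k + 1 : ℕ) : Int) + 1 = ((k + 2 : ℕ) : Int) := by push_cast; ring
  rw [h1, h3, h2, PySem.List.pyGetD_natCast, PySem.List.pyGetD_natCast,
      PySem.List.slice_from_natCast, PySem.List.slice_from_natCast]
  rfl

theorem map_cA_eq_candList (nums : List Int) :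
    (PySem.List.pyRange 0 ((nums.length : Int) - 1) 1).map (cA nums) = candList nums := by
  induction nums with
  | nil => simp [PySem.List.pyRange_one_eq_nil, candList]
  | cons x xs ih =>
      cases xs with
      | nil => simp [PySem.List.pyRange_one_eq_nil, candList]
      | cons y t =>
          have hlen : ((x :: y :: t).length : Int) - 1 = ((y :: t).length : Int) := by
            simp only [List.length_cons]; push_cast; ring
          rw [hlen]
          have hpos : (0 : Int) < ((y :: t).length : Int) := by
            simp only [List.length_cons]; push_cast; omega
          rw [PySem.List.pyRange_one_cons hpos]
          simp only [zero_add]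
          have hshift : PySem.List.pyRange 1 ((y :: t).length : Int) 1 =
              (PySem.List.pyRange 0 (((y :: t).length : Int) - 1) 1).map (fun k => 1 + k) := by
            rw [PySem.List.pyRange_one, PySem.List.pyRange_one]
            rw [List.map_map]
            have : (((y :: t).length : Int) - 1 - 0).toNat = (((y :: t).length : Int) - 1).toNat := by
              omega
            rw [this]
            simp [Function.comp_def]
          have hhead : cA (x :: y :: t) 0 = 10 * x + t.foldl max y := by
            unfold cA
            have : (0 : Int) + 1 = ((1 : ℕ) : Int) := by norm_num
            rw [this, PySem.List.slice_from_natCast]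
            simp [PySem.List.pyGetD_zero_cons, PySem.List.max?_id_cons]
          rw [List.map_cons, hhead, hshift, List.map_map]
          have htail : ((PySem.List.pyRange 0 (((y :: t).length : Int) - 1) 1).map
                (cA (x :: y :: t) ∘ fun k => 1 + k)) = candList (y :: t) := by
            rw [← ih]
            refine List.map_congr_left (fun i hi => ?_)
            have hmem := (PySem.List.mem_pyRange_one).1 hi
            obtain ⟨k, rfl⟩ : ∃ k : ℕ, i = (k : Int) := ⟨i.toNat, by omega⟩
            exact cA_shift x (y :: t) k
          rw [htail]
          rfl

theorem A_eq_ref (nums : List Int) : largest_two_digit nums = refVal nums := by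
  rw [A_as_foldmax, map_cA_eq_candList]; rfl

-- ---- B equals refVal ----

-- list maximum as B maintains it
def listMax? : List Int → Option Int
  | [] => none
  | x :: xs => some (xs.foldl max x)

theorem B_state (nums : List Int) :
    nums.reverse.foldl bStep (none, 0) = (listMax? nums, refVal nums) := by
  induction nums with
  | nil => rfl
  | cons x xs ih =>
      rw [List.reverse_cons, List.foldl_append, ih]
      cases xs with
      | nil => rfl
      | cons y t =>
          simp only [List.foldl_cons, List.foldl_nil, listMax?, bStep, Prod.mk.injEq]
          refine ⟨?_, ?_⟩
          · -- suffix max update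
            rw [ite_gt_eq_max, foldl_max_init t x y]
            exact congrArg some (max_comm _ _)
          · -- best update
            rw [ite_gt_eq_max]
            have h1 : refVal (x :: y :: t) =
                (candList (y :: t)).foldl max (max 0 (10 * x + t.foldl max y)) := rfl
            rw [h1, max_comm (0 : Int), foldl_max_init]
            exact max_comm _ _

theorem B_eq_ref (nums : List Int) : largest_two_digit_alt nums = refVal nums := by
  unfold largest_two_digit_alt
  rw [B_state]

-- ===== VERDICT (by name: the statement is the Claim_ definition above) =====
theorem largest_two_digit_spec : Claim_equal_largest_two_digit := by
  intro nums _
  unfold Spec_largest_two_digit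
  rw [A_eq_ref, B_eq_ref]
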